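-- pv_equiv track=rewrite | github.com/g-ammer/multilevel_visual_motion_opponency | Figure_3/Connectome analysis/functions_module.py | check_pts_in_roi
-- ===== SOURCE A (Python) =====
-- def check_pts_in_roi(pts_list, roi):
--     output_bool = True
--     for i, pt in enumerate(pts_list):
--         # x coordinate
--         if pt[0] < roi[0][0] or pt[0] > roi[0][1]:
--             output_bool = False
--         # y coordinate
--         if pt[1] < roi[1][0] or pt[1] > roi[1][1]:
--             output_bool = False
--         # z coordinate
--         if pt[2] < roi[2][0] or pt[2] > roi[2][1]:
--             output_bool = False
--     return output_bool
-- ===== SOURCE B (Python) =====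
-- def check_pts_in_roi(pts_list, roi):
--     if not pts_list:
--         return True
--     xs = [p[0] for p in pts_list]
--     ys = [p[1] for p in pts_list]
--     zs = [p[2] for p in pts_list]
--     return (roi[0][0] <= min(xs) and max(xs) <= roi[0][1]
--             and roi[1][0] <= min(ys) and max(ys) <= roi[1][1]
--             and roi[2][0] <= min(zs) and max(zs) <= roi[2][1])
-- ===== Notes on version B (the rewrite author's own statement) =====
-- stated objective: alternative
-- what changed: Replaces A's per-point row-wise loop that re-checks all three axis bounds for every point with a column-wise reduction: B gathers each coordinate column, takes its min and max, and compares the bounding box against the ROI, with an explicit empty-list guard.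
import Mathlib
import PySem

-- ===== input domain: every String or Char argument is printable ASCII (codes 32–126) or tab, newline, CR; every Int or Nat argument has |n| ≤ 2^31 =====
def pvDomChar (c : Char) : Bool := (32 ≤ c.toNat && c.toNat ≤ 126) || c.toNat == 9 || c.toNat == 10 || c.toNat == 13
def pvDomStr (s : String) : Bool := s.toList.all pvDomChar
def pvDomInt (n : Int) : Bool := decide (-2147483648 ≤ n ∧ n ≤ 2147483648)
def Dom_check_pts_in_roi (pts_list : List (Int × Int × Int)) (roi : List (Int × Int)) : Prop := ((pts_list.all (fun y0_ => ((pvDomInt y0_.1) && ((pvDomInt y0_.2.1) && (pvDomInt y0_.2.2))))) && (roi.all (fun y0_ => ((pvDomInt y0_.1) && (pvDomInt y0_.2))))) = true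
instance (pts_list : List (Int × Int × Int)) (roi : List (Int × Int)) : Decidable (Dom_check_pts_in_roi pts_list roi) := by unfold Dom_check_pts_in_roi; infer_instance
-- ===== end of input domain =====

-- B replaces A's per-point loop by a per-axis min/max bounding-box comparison (objective: alternative; same cost).
-- ===== PORT A =====
-- A reads roi[0], roi[1], roi[2] inside the loop; pyGet? with a .getD default is only reached outside Pre_.
def check_pts_in_roi (pts_list : List (Int × Int × Int)) (roi : List (Int × Int)) : Bool :=
  pts_list.foldl (fun output_bool pt =>
    let r0 := (PySem.List.pyGet? roi 0).getD (0, 0)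
    let r1 := (PySem.List.pyGet? roi 1).getD (0, 0)
    let r2 := (PySem.List.pyGet? roi 2).getD (0, 0)
    let b1 := if pt.1 < r0.1 || pt.1 > r0.2 then false else output_bool
    let b2 := if pt.2.1 < r1.1 || pt.2.1 > r1.2 then false else b1
    if pt.2.2 < r2.1 || pt.2.2 > r2.2 then false else b2) true

-- ===== PORT B =====
def check_pts_in_roi_alt (pts_list : List (Int × Int × Int)) (roi : List (Int × Int)) : Bool :=
  match pts_list with
  | [] => true
  | _ :: _ =>
    let xs := pts_list.map (·.1)
    let ys := pts_list.map (·.2.1)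
    let zs := pts_list.map (·.2.2)
    let r0 := (PySem.List.pyGet? roi 0).getD (0, 0)
    let r1 := (PySem.List.pyGet? roi 1).getD (0, 0)
    let r2 := (PySem.List.pyGet? roi 2).getD (0, 0)
    decide (r0.1 ≤ (PySem.List.min? xs (fun v => v)).getD 0) &&
    decide ((PySem.List.max? xs (fun v => v)).getD 0 ≤ r0.2) &&
    decide (r1.1 ≤ (PySem.List.min? ys (fun v => v)).getD 0) &&
    decide ((PySem.List.max? ys (fun v => v)).getD 0 ≤ r1.2) &&
    decide (r2.1 ≤ (PySem.List.min? zs (fun v => v)).getD 0) &&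
    decide ((PySem.List.max? zs (fun v => v)).getD 0 ≤ r2.2)

-- ===== PRECONDITION & SPEC =====
-- A raises IndexError (roi[0]/roi[1]/roi[2]) when pts_list is nonempty and roi has fewer than 3 entries; Pre_ excludes exactly that.
def Pre_check_pts_in_roi (pts_list : List (Int × Int × Int)) (roi : List (Int × Int)) : Prop :=
  pts_list = [] ∨ 3 ≤ roi.length
instance (pts_list : List (Int × Int × Int)) (roi : List (Int × Int)) : Decidable (Pre_check_pts_in_roi pts_list roi) := by unfold Pre_check_pts_in_roi; infer_instance
def pvWitness_check_pts_in_roi : (List (Int × Int × Int)) × (List (Int × Int)) :=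
  ([(1, 2, 3)], [(0, 5), (0, 5), (0, 5)])

def Spec_check_pts_in_roi (pts_list : List (Int × Int × Int)) (roi : List (Int × Int)) (out : Bool) : Prop := out = check_pts_in_roi_alt pts_list roi
instance (pts_list : List (Int × Int × Int)) (roi : List (Int × Int)) (out : Bool) : Decidable (Spec_check_pts_in_roi pts_list roi out) := by unfold Spec_check_pts_in_roi; infer_instance

-- ===== CLAIM (what is proved, stated in full; the proofs are below) =====
def Claim_equal_check_pts_in_roi : Prop := ∀ (pts_list : List (Int × Int × Int)) (roi : List (Int × Int)), Dom_check_pts_in_roi pts_list roi → Pre_check_pts_in_roi pts_list roi → Spec_check_pts_in_roi pts_list roi (check_pts_in_roi pts_list roi)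

-- ===== LEMMAS AND PROOFS =====

-- the per-point check of A with the three roi rows fixed
def pvChk (r0 r1 r2 : Int × Int) (pt : Int × Int × Int) : Bool :=
  !(pt.1 < r0.1 || pt.1 > r0.2) && !(pt.2.1 < r1.1 || pt.2.1 > r1.2) && !(pt.2.2 < r2.1 || pt.2.2 > r2.2)

theorem pvAllAnd (l : List Int) (f g : Int → Bool) :
    (l.all f && l.all g) = l.all (fun v => f v && g v) := by
  induction l with
  | nil => rfl
  | cons y s ih =>
    simp only [List.all_cons, ← ih]
    cases f y <;> cases g y <;> cases s.all f <;> cases s.all g <;> rfl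

theorem pvAllAnd3 (l : List (Int × Int × Int)) (f g h : Int × Int × Int → Bool) :
    (l.all f && l.all g && l.all h) = l.all (fun v => f v && g v && h v) := by
  induction l with
  | nil => rfl
  | cons y s ih =>
    simp only [List.all_cons, ← ih]
    cases f y <;> cases g y <;> cases h y <;>
      cases s.all f <;> cases s.all g <;> cases s.all h <;> rfl

theorem pvA_foldl (r0 r1 r2 : Int × Int) (roi : List (Int × Int))
    (h0 : (PySem.List.pyGet? roi 0).getD (0,0) = r0)
    (h1 : (PySem.List.pyGet? roi 1).getD (0,0) = r1)
    (h2 : (PySem.List.pyGet? roi 2).getD (0,0) = r2) :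
    ∀ (l : List (Int × Int × Int)) (a : Bool),
      l.foldl (fun output_bool pt =>
        let s0 := (PySem.List.pyGet? roi 0).getD (0, 0)
        let s1 := (PySem.List.pyGet? roi 1).getD (0, 0)
        let s2 := (PySem.List.pyGet? roi 2).getD (0, 0)
        let b1 := if pt.1 < s0.1 || pt.1 > s0.2 then false else output_bool
        let b2 := if pt.2.1 < s1.1 || pt.2.1 > s1.2 then false else b1
        if pt.2.2 < s2.1 || pt.2.2 > s2.2 then false else b2) a
      = (a && l.all (pvChk r0 r1 r2)) := by
  intro l
  induction l with
  | nil => simp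
  | cons p t ih =>
    intro a
    rw [List.foldl_cons, List.all_cons, ih]
    simp only [h0, h1, h2, pvChk]
    cases hx : (decide (p.1 < r0.1) || decide (p.1 > r0.2)) <;>
      cases hy : (decide (p.2.1 < r1.1) || decide (p.2.1 > r1.2)) <;>
      cases hz : (decide (p.2.2 < r2.1) || decide (p.2.2 > r2.2)) <;>
      cases a <;> simp

theorem pvMinFold (lo : Int) : ∀ (t : List Int) (x : Int),
    decide (lo ≤ t.foldl min x) = (decide (lo ≤ x) && t.all (fun v => decide (lo ≤ v))) := by
  intro t
  induction t with
  | nil => simp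
  | cons y s ih =>
    intro x
    rw [List.foldl_cons, List.all_cons, ih (min x y)]
    simp [Bool.and_assoc]

theorem pvMaxFold (hi : Int) : ∀ (t : List Int) (x : Int),
    decide (t.foldl max x ≤ hi) = (decide (x ≤ hi) && t.all (fun v => decide (v ≤ hi))) := by
  intro t
  induction t with
  | nil => simp
  | cons y s ih =>
    intro x
    rw [List.foldl_cons, List.all_cons, ih (max x y)]
    simp [Bool.and_assoc]

theorem pvAxis (lo hi : Int) (xs : List Int) (h : xs ≠ []) :
    (decide (lo ≤ (PySem.List.min? xs (fun v => v)).getD 0) &&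
     decide ((PySem.List.max? xs (fun v => v)).getD 0 ≤ hi))
    = xs.all (fun v => decide (lo ≤ v) && decide (v ≤ hi)) := by
  match xs, h with
  | x :: t, _ => ?_
  rw [PySem.List.min?_id_cons, PySem.List.max?_id_cons, Option.getD_some, Option.getD_some,
    pvMinFold lo t x, pvMaxFold hi t x]
  rw [show ∀ a b c d : Bool, ((a && b) && (c && d)) = ((a && c) && (b && d)) by decide]
  rw [pvAllAnd, List.all_cons]


-- ===== VERDICT =====
theorem check_pts_in_roi_spec : Claim_equal_check_pts_in_roi := by
  intro pts roi _ hpre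
  unfold Spec_check_pts_in_roi
  cases pts with
  | nil => rfl
  | cons p t =>
    unfold check_pts_in_roi check_pts_in_roi_alt
    rw [pvA_foldl ((PySem.List.pyGet? roi 0).getD (0,0)) ((PySem.List.pyGet? roi 1).getD (0,0))
        ((PySem.List.pyGet? roi 2).getD (0,0)) roi rfl rfl rfl]
    simp only [Bool.true_and]
    rw [show ∀ a b c d e f : Bool, (a && b && c && d && e && f) = ((a && b) && (c && d) && (e && f)) by decide]
    rw [pvAxis _ _ _ (by simp), pvAxis _ _ _ (by simp), pvAxis _ _ _ (by simp)]
    simp only [List.all_map, Function.comp_def]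
    rw [pvAllAnd3]
    apply List.all_congr rfl
    intro q
    simp only [pvChk, Bool.not_or, ← decide_not, not_lt, gt_iff_lt, Bool.and_assoc]
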